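-- pv_equiv track=rewrite | github.com/htmercury/advent-of-code-2023 | point-of-incidence/solution-1.py | is_reflected_x
-- ===== SOURCE A (Python) =====
-- def is_reflected_x(pattern, y_max, x_max, left_idx, right_idx):
--     if left_idx < 0 or right_idx >= y_max:
--         return True
--     else:
--         for i in range(x_max):
--             if pattern[left_idx][i] != pattern[right_idx][i]:
--                 return False
--         return is_reflected_x(pattern, y_max, x_max, left_idx - 1, right_idx + 1)
-- ===== SOURCE B (Python) =====
-- def is_reflected_x(pattern, y_max, x_max, left_idx, right_idx):
--     l, r = left_idx, right_idx
--     while l >= 0 and r < y_max: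
--         if pattern[l][:x_max] != pattern[r][:x_max]:
--             return False
--         l -= 1
--         r += 1
--     return True
-- ===== Notes on version B (the rewrite author's own statement) =====
-- stated objective: idiomatic
-- what changed: The tail recursion becomes an explicit two-cursor while loop, and the per-column index scan is replaced by a single slice comparison pattern[l][:x_max] == pattern[r][:x_max] per row pair.
-- outside the precondition, e.g. on is_reflected_x([['a', 'b'], ['c', 'd']], 2, -1, 0, 1): A returns True, B returns False; on is_reflected_x([['a', 'x'], ['b']], 2, 2, 0, 1): A returns False, B returns False
import Mathlib
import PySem

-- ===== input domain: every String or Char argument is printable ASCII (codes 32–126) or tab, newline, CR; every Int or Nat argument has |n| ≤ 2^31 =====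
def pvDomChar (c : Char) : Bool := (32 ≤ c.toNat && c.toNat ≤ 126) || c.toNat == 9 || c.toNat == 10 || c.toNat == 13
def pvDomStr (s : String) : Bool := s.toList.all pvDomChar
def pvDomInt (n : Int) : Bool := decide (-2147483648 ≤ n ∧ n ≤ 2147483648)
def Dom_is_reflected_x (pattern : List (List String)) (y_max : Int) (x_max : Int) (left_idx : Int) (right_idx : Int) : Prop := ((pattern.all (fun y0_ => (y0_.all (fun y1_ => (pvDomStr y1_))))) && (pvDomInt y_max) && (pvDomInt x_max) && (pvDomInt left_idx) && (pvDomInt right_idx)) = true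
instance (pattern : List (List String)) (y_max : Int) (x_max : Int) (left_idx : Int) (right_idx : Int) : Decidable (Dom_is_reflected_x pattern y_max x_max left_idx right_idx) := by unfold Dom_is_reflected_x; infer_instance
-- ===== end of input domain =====

-- B rewrites A's tail recursion as an explicit two-cursor while loop comparing row prefixes by slicing (idiomatic; same cost).


-- ===== PORT A =====
-- pattern[l][i] (IndexError modeled as none, handled by returning false outside Pre_)
def aCell (pattern : List (List String)) (l i : Int) : Option String :=
  (PySem.List.pyGet? pattern l).bind (fun row => PySem.List.pyGet? row i)

-- 'for i in range(x_max): if pattern[li][i] != pattern[ri][i]: return False' — false = early return / IndexError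
def aRowLoop (pattern : List (List String)) (li ri : Int) : List Int → Bool
  | [] => true
  | i :: is =>
    match aCell pattern li i, aCell pattern ri i with
    | some a, some b => if a ≠ b then false else aRowLoop pattern li ri is
    | _, _ => false

def is_reflected_x (pattern : List (List String)) (y_max : Int) (x_max : Int) (left_idx : Int) (right_idx : Int) : Bool :=
  if left_idx < 0 ∨ right_idx ≥ y_max then true
  else if aRowLoop pattern left_idx right_idx (PySem.List.pyRange 0 x_max 1) then
    is_reflected_x pattern y_max x_max (left_idx - 1) (right_idx + 1)
  else false
termination_by (left_idx + 1).toNat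
decreasing_by omega

-- ===== PORT B =====
-- the while loop of Source B, cursors moving outward; IndexError on pattern[l]/pattern[r] modeled as false (outside Pre_)
def is_reflected_x_alt (pattern : List (List String)) (y_max : Int) (x_max : Int) (left_idx : Int) (right_idx : Int) : Bool :=
  if 0 ≤ left_idx ∧ right_idx < y_max then
    match PySem.List.pyGet? pattern left_idx, PySem.List.pyGet? pattern right_idx with
    | some rl, some rr =>
      if PySem.List.slice rl none (some x_max) ≠ PySem.List.slice rr none (some x_max) then false
      else is_reflected_x_alt pattern y_max x_max (left_idx - 1) (right_idx + 1)
    | _, _ => false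
  else true
termination_by (left_idx + 1).toNat
decreasing_by omega

-- ===== PRECONDITION & SPEC =====
-- Pre_ excludes negative x_max (a degenerate width on which A's empty range(x_max) vacuously passes every row while
-- B's negative-end slices compare real prefixes — neither value is specified for a negative width), and inputs whose
-- rows are shorter than x_max or whose row indices run past the pattern, where A's index scan raises IndexError
-- unless an earlier mismatch happens to stop it first.
def Pre_is_reflected_x (pattern : List (List String)) (y_max : Int) (x_max : Int) (left_idx : Int) (right_idx : Int) : Prop :=
  (left_idx < 0 ∨ right_idx ≥ y_max) ∨
  (0 ≤ x_max ∧ left_idx < pattern.length ∧ y_max ≤ pattern.length ∧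
   -(pattern.length : Int) ≤ right_idx ∧ ∀ row ∈ pattern, x_max ≤ row.length)
instance (pattern : List (List String)) (y_max : Int) (x_max : Int) (left_idx : Int) (right_idx : Int) : Decidable (Pre_is_reflected_x pattern y_max x_max left_idx right_idx) := by unfold Pre_is_reflected_x; infer_instance

def pvWitness_is_reflected_x : List (List String) × Int × Int × Int × Int := ([["#"], ["#"]], 2, 1, 0, 1)

def Spec_is_reflected_x (pattern : List (List String)) (y_max : Int) (x_max : Int) (left_idx : Int) (right_idx : Int) (out : Bool) : Prop := out = is_reflected_x_alt pattern y_max x_max left_idx right_idx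
instance (pattern : List (List String)) (y_max : Int) (x_max : Int) (left_idx : Int) (right_idx : Int) (out : Bool) : Decidable (Spec_is_reflected_x pattern y_max x_max left_idx right_idx out) := by unfold Spec_is_reflected_x; infer_instance

-- ===== CLAIM (what is proved, stated in full; the proofs are below) =====
def Claim_equal_is_reflected_x : Prop := ∀ (pattern : List (List String)) (y_max : Int) (x_max : Int) (left_idx : Int) (right_idx : Int), Dom_is_reflected_x pattern y_max x_max left_idx right_idx → Pre_is_reflected_x pattern y_max x_max left_idx right_idx → Spec_is_reflected_x pattern y_max x_max left_idx right_idx (is_reflected_x pattern y_max x_max left_idx right_idx)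

-- ===== LEMMAS AND PROOFS =====

-- A's inner scan over range(a, x) equals prefix-equality of the corresponding drop/take slices
theorem aRowLoop_eq_take (pattern : List (List String)) (li ri : Int) (rl rr : List String)
    (hl : PySem.List.pyGet? pattern li = some rl) (hr : PySem.List.pyGet? pattern ri = some rr)
    (a x : Int) (ha : 0 ≤ a) (h1 : x ≤ (rl.length : Int)) (h2 : x ≤ (rr.length : Int)) :
    aRowLoop pattern li ri (PySem.List.pyRange a x 1)
      = decide ((rl.drop a.toNat).take (x - a).toNat = (rr.drop a.toNat).take (x - a).toNat) := by
  have key : ∀ (n : Nat) (a : Int), 0 ≤ a → (x - a).toNat = n →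
      aRowLoop pattern li ri (PySem.List.pyRange a x 1)
        = decide ((rl.drop a.toNat).take (x - a).toNat = (rr.drop a.toNat).take (x - a).toNat) := by
    intro n
    induction n with
    | zero =>
      intro a ha h0
      have hxa : x ≤ a := by omega
      have hrange : PySem.List.pyRange a x 1 = [] := by
        simp [PySem.List.pyRange]; omega
      rw [hrange, h0]
      simp [aRowLoop]
    | succ n ih =>
      intro a ha h
      have hax : a < x := by omega
      rw [PySem.List.pyRange_one_cons hax]
      have hal : aCell pattern li a = some rl[a.toNat] := by
        simp [aCell, hl]
        exact PySem.List.pyGet?_eq_some_getElem _ ha (by omega)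
      have har : aCell pattern ri a = some rr[a.toNat] := by
        simp [aCell, hr]
        exact PySem.List.pyGet?_eq_some_getElem _ ha (by omega)
      have hdl : rl.drop a.toNat = rl[a.toNat] :: rl.drop (a.toNat + 1) :=
        List.drop_eq_getElem_cons (by omega)
      have hdr : rr.drop a.toNat = rr[a.toNat] :: rr.drop (a.toNat + 1) :=
        List.drop_eq_getElem_cons (by omega)
      have htk : (x - a).toNat = (x - (a + 1)).toNat + 1 := by omega
      have ha1 : ((a : Int) + 1).toNat = a.toNat + 1 := by omega
      simp only [aRowLoop, hal, har]
      rw [hdl, hdr, htk, List.take_succ_cons, List.take_succ_cons]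
      by_cases hne : rl[a.toNat] = rr[a.toNat]
      · rw [if_neg (by simp [hne]), ih (a + 1) (by omega) (by omega), ha1]
        simp [hne]
      · rw [if_pos (by simp [hne])]
        simp [hne]
  exact key (x - a).toNat a ha rfl

theorem main_equiv (pattern : List (List String)) (y_max : Int) (x_max : Int) (left_idx : Int) (right_idx : Int)
    (hpre : Pre_is_reflected_x pattern y_max x_max left_idx right_idx) :
    is_reflected_x pattern y_max x_max left_idx right_idx
      = is_reflected_x_alt pattern y_max x_max left_idx right_idx := by
  fun_induction is_reflected_x pattern y_max x_max left_idx right_idx with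
  | case1 l r hc =>
    rw [is_reflected_x_alt]
    rw [if_neg (by omega)]
  | case2 l r hc hrow ih =>
    rcases hpre with hc' | hside
    · exact absurd hc' hc
    obtain ⟨hx0, hllen, hylen, hrlo, hrows⟩ := hside
    have hl0 : 0 ≤ l := by omega
    have hry : r < y_max := by omega
    have hgl : PySem.List.pyGet? pattern l = some pattern[l.toNat] :=
      PySem.List.pyGet?_eq_some_getElem _ hl0 (by omega)
    have hgr0 : PySem.List.pyGet? pattern r ≠ none := by
      intro hnone
      rw [PySem.List.pyGet?_eq_none_iff] at hnone
      simp [PySem.Raise.InRange] at hnone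
      omega
    obtain ⟨rr, hgr⟩ : ∃ v, PySem.List.pyGet? pattern r = some v := by
      cases h : PySem.List.pyGet? pattern r with
      | none => exact absurd h hgr0
      | some v => exact ⟨v, rfl⟩
    have hmeml : pattern[l.toNat] ∈ pattern := List.getElem_mem _
    have hmemr : rr ∈ pattern := PySem.List.mem_of_pyGet?_eq_some _ hgr
    have hlenl := hrows _ hmeml
    have hlenr := hrows _ hmemr
    rw [aRowLoop_eq_take pattern l r _ rr hgl hgr 0 x_max le_rfl hlenl hlenr] at hrow
    rw [is_reflected_x_alt, if_pos ⟨hl0, hry⟩, hgl, hgr]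
    show _ = if PySem.List.slice pattern[l.toNat] none (some x_max) ≠ PySem.List.slice rr none (some x_max) then false else is_reflected_x_alt pattern y_max x_max (l - 1) (r + 1)
    rw [PySem.List.slice_to _ hx0, PySem.List.slice_to _ hx0]
    simp only [Int.sub_zero] at hrow
    rw [if_neg (by simpa using of_decide_eq_true hrow)]
    apply ih
    right
    exact ⟨hx0, by omega, hylen, by omega, hrows⟩
  | case3 l r hc hrow =>
    rcases hpre with hc' | hside
    · exact absurd hc' hc
    obtain ⟨hx0, hllen, hylen, hrlo, hrows⟩ := hside
    have hl0 : 0 ≤ l := by omega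
    have hry : r < y_max := by omega
    have hgl : PySem.List.pyGet? pattern l = some pattern[l.toNat] :=
      PySem.List.pyGet?_eq_some_getElem _ hl0 (by omega)
    have hgr0 : PySem.List.pyGet? pattern r ≠ none := by
      intro hnone
      rw [PySem.List.pyGet?_eq_none_iff] at hnone
      simp [PySem.Raise.InRange] at hnone
      omega
    obtain ⟨rr, hgr⟩ : ∃ v, PySem.List.pyGet? pattern r = some v := by
      cases h : PySem.List.pyGet? pattern r with
      | none => exact absurd h hgr0
      | some v => exact ⟨v, rfl⟩
    have hmeml : pattern[l.toNat] ∈ pattern := List.getElem_mem _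
    have hmemr : rr ∈ pattern := PySem.List.mem_of_pyGet?_eq_some _ hgr
    have hlenl := hrows _ hmeml
    have hlenr := hrows _ hmemr
    rw [aRowLoop_eq_take pattern l r _ rr hgl hgr 0 x_max le_rfl hlenl hlenr] at hrow
    rw [is_reflected_x_alt, if_pos ⟨hl0, hry⟩, hgl, hgr]
    show _ = if PySem.List.slice pattern[l.toNat] none (some x_max) ≠ PySem.List.slice rr none (some x_max) then false else is_reflected_x_alt pattern y_max x_max (l - 1) (r + 1)
    rw [PySem.List.slice_to _ hx0, PySem.List.slice_to _ hx0]
    simp only [Int.sub_zero] at hrow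
    rw [if_pos (by simpa using of_decide_eq_false (Bool.not_eq_true _ ▸ hrow))]

-- ===== VERDICT (by name: the statement is the Claim_ definition above) =====
theorem is_reflected_x_spec : Claim_equal_is_reflected_x := by
  intro pattern y_max x_max left_idx right_idx _ hpre
  exact main_equiv pattern y_max x_max left_idx right_idx hpre
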